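-- pv_equiv track=rewrite | github.com/Kristian2109/Homeworks | knn/main.py | encode_categorical_values
-- ===== SOURCE A (Python) =====
-- from typing import Sequence
--
-- def encode_categorical_values(values: Sequence):
--     values_encoding = dict()
--     values_set = set()
--     current_index = 0
--
--     for v in values:
--         if v not in values_set:
--             values_encoding[v] = current_index
--             values_set.add(v)
--             current_index += 1
--
--     return [values_encoding[v] for v in values]
-- ===== SOURCE B (Python) =====
-- def encode_categorical_values(values):
--     values = list(values)
--     return [len(set(values[:values.index(v) + 1])) - 1 for v in values]
-- ===== Notes on version B (the rewrite author's own statement) =====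
-- stated objective: alternative
-- what changed: Replaces A's incremental state machine (dict + auxiliary set + running counter built in one pass, then a lookup pass) with a stateless per-element closed form: the code of v is the number of distinct values in the prefix ending at v's first occurrence, minus one, computed directly by slicing.
import Mathlib
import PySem

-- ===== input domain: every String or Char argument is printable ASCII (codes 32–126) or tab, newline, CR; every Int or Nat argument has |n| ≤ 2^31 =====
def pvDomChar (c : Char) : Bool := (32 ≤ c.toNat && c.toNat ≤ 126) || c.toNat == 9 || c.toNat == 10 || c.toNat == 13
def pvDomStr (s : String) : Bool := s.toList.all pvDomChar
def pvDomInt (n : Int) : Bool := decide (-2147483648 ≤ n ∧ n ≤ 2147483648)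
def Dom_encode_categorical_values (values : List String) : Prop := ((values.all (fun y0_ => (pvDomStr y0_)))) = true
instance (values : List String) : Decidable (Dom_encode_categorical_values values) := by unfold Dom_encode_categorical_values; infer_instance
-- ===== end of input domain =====

-- B replaces A's incremental state machine (dict + set + counter, then a lookup pass) by a stateless
-- per-element closed form: code(v) = |set(values[: values.index(v)+1])| - 1; objective: alternative.

-- ===== PORT A =====
-- A: one loop builds values_encoding / values_set / current_index; then a comprehension looks every
-- value up in the finished dict. values_encoding[v] cannot raise (every v was inserted), so getD 0 is exact.
def encode_categorical_values (values : List String) : List Int :=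
  let st := values.foldl
    (fun st v =>
      if PySem.Set.contains st.2.1 v then st
      else (st.1.insert v st.2.2, PySem.Set.add st.2.1 v, st.2.2 + 1))
    ((PySem.Dict.empty : PySem.Dict String Int), (PySem.Set.empty : PySem.Set String), (0 : Int))
  values.map (fun v => st.1.getD v 0)

-- ===== PORT B =====
-- B: for each v, values.index(v) (always succeeds: v ∈ values, so the none arm is unreachable),
-- then len(set(values[:j+1])) - 1.
def encode_categorical_values_alt (values : List String) : List Int :=
  values.map (fun v =>
    match PySem.List.index? values v with
    | some j => PySem.Set.len (PySem.Set.ofList (PySem.List.slice values none (some ((j : Int) + 1)))) - 1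
    | none => 0)

-- ===== PRECONDITION & SPEC =====
def Spec_encode_categorical_values (values : List String) (out : List Int) : Prop := out = encode_categorical_values_alt values
instance (values : List String) (out : List Int) : Decidable (Spec_encode_categorical_values values out) := by unfold Spec_encode_categorical_values; infer_instance

-- ===== CLAIM (what is proved, stated in full; the proofs are below) =====
def Claim_equal_encode_categorical_values : Prop := ∀ (values : List String), Dom_encode_categorical_values values → Spec_encode_categorical_values values (encode_categorical_values values)

-- ===== LEMMAS AND PROOFS =====

-- the dict component of A's fold, on its own
def buildDict (d : PySem.Dict String Int) (vs : List String) : PySem.Dict String Int :=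
  vs.foldl (fun d v => if d.contains v then d else d.insert v (d.size : Int)) d

lemma foldA_eq (vs : List String) (d : PySem.Dict String Int) (hnd : d.keys.Nodup) :
    vs.foldl
      (fun st v =>
        if PySem.Set.contains st.2.1 v then st
        else (st.1.insert v st.2.2, PySem.Set.add st.2.1 v, st.2.2 + 1))
      (d, d.keys, (d.size : Int))
    = (buildDict d vs, (buildDict d vs).keys, ((buildDict d vs).size : Int)) := by
  induction vs generalizing d with
  | nil => simp [buildDict]
  | cons v rest ih =>
    have hcv : PySem.Set.contains d.keys v = d.contains v := by
      simp [PySem.Set.contains, PySem.Dict.contains_eq_decide_mem_keys]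
    rw [List.foldl_cons, hcv]
    by_cases h : d.contains v = true
    · have hb : buildDict d (v :: rest) = buildDict d rest := by
        simp [buildDict, h]
      rw [hb]
      simpa [h] using ih d hnd
    · have h' : d.contains v = false := by simpa using h
      have hkeys : (d.insert v (d.size : Int)).keys = d.keys ++ [v] :=
        PySem.Dict.keys_insert_of_not_contains d (d.size : Int) h'
      have hsize : ((d.insert v (d.size : Int)).size : Int) = (d.size : Int) + 1 := by
        rw [PySem.Dict.size_insert]
        simp [h']
      have hnd' : (d.insert v (d.size : Int)).keys.Nodup :=
        PySem.Dict.nodup_keys_insert d v (d.size : Int) hnd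
      have hb : buildDict d (v :: rest) = buildDict (d.insert v (d.size : Int)) rest := by
        simp [buildDict, h']
      have hmem : v ∉ d.keys := by
        have hc := PySem.Dict.contains_eq_decide_mem_keys d v
        rw [h'] at hc
        simpa using hc.symm
      have hadd : PySem.Set.add d.keys v = d.keys ++ [v] := by
        simp [PySem.Set.add, PySem.Set.contains, hmem]
      rw [hb, h']
      simp only [Bool.false_eq_true, if_false, hadd, ← hkeys, ← hsize]
      exact ih (d.insert v (d.size : Int)) hnd'

lemma keys_length_eq_size (d : PySem.Dict String Int) : d.keys.length = d.size := by
  simp [PySem.Dict.keys, PySem.Dict.size]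

-- the keys of the finished dict are the ordered dedup of the processed values
lemma keys_buildDict (vs : List String) (d : PySem.Dict String Int) :
    (buildDict d vs).keys = PySem.Set.update d.keys vs := by
  induction vs generalizing d with
  | nil => simp [buildDict, PySem.Set.update]
  | cons v rest ih =>
    by_cases h : d.contains v = true
    · have hmem : v ∈ d.keys := by
        have hc := PySem.Dict.contains_eq_decide_mem_keys d v
        rw [h] at hc
        simpa using hc.symm
      have hb : buildDict d (v :: rest) = buildDict d rest := by
        simp [buildDict, h]
      have hadd : PySem.Set.add d.keys v = d.keys := by
        simp [PySem.Set.add, PySem.Set.contains, hmem]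
      rw [hb, ih d]
      simp [PySem.Set.update, hadd]
    · have h' : d.contains v = false := by simpa using h
      have hmem : v ∉ d.keys := by
        have hc := PySem.Dict.contains_eq_decide_mem_keys d v
        rw [h'] at hc
        simpa using hc.symm
      have hb : buildDict d (v :: rest) = buildDict (d.insert v (d.size : Int)) rest := by
        simp [buildDict, h']
      have hkeys : (d.insert v (d.size : Int)).keys = d.keys ++ [v] :=
        PySem.Dict.keys_insert_of_not_contains d (d.size : Int) h'
      have hadd : PySem.Set.add d.keys v = d.keys ++ [v] := by
        simp [PySem.Set.add, PySem.Set.contains, hmem]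
      rw [hb, ih _, hkeys]
      simp [PySem.Set.update, hadd]

-- invariant: every stored code is the key's position in the insertion-order key list
lemma get?_buildDict (vs : List String) (d : PySem.Dict String Int)
    (hnd : d.keys.Nodup)
    (hinv : ∀ k ∈ d.keys, d.get? k = some ((d.keys.idxOf k : Nat) : Int)) :
    ∀ k ∈ (buildDict d vs).keys,
      (buildDict d vs).get? k = some (((buildDict d vs).keys.idxOf k : Nat) : Int) := by
  induction vs generalizing d with
  | nil => simpa [buildDict] using hinv
  | cons v rest ih =>
    by_cases h : d.contains v = true
    · have hb : buildDict d (v :: rest) = buildDict d rest := by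
        simp [buildDict, h]
      rw [hb]
      exact ih d hnd hinv
    · have h' : d.contains v = false := by simpa using h
      have hmem : v ∉ d.keys := by
        have hc := PySem.Dict.contains_eq_decide_mem_keys d v
        rw [h'] at hc
        simpa using hc.symm
      have hkeys : (d.insert v (d.size : Int)).keys = d.keys ++ [v] :=
        PySem.Dict.keys_insert_of_not_contains d (d.size : Int) h'
      have hnd' : (d.insert v (d.size : Int)).keys.Nodup :=
        PySem.Dict.nodup_keys_insert d v (d.size : Int) hnd
      have hb : buildDict d (v :: rest) = buildDict (d.insert v (d.size : Int)) rest := by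
        simp [buildDict, h']
      rw [hb]
      apply ih (d.insert v (d.size : Int)) hnd'
      intro k hk
      rw [hkeys] at hk
      rcases List.mem_append.mp hk with hkl | hkv
      · have hne : k ≠ v := fun e => hmem (e ▸ hkl)
        rw [PySem.Dict.get?_insert_of_ne d (d.size : Int) hne, hkeys,
          List.idxOf_append_of_mem hkl]
        exact hinv k hkl
      · have hkv' : k = v := by simpa using hkv
        subst hkv'
        rw [PySem.Dict.get?_insert_self, hkeys, List.idxOf_append, if_neg hmem]
        simp [← keys_length_eq_size]

-- A's output is the map of first-occurrence ranks in the ordered dedup of values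
lemma encodeA_eq_map_idxOf (values : List String) :
    encode_categorical_values values
      = values.map (fun v => (((PySem.Set.ofList values).idxOf v : Nat) : Int)) := by
  unfold encode_categorical_values
  have h0 := foldA_eq values PySem.Dict.empty (by simp)
  simp only [PySem.Dict.keys_empty, PySem.Dict.size_empty, Nat.cast_zero] at h0
  simp only [show (PySem.Set.empty : PySem.Set String) = ([] : List String) from rfl]
  simp only [h0]
  have hkeys : (buildDict PySem.Dict.empty values).keys = PySem.Set.ofList values := by
    rw [keys_buildDict]
    simp [PySem.Set.update, PySem.Set.ofList_eq_foldl, PySem.Dict.keys_empty]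
  apply List.map_congr_left
  intro v hv
  have hvk : v ∈ (buildDict PySem.Dict.empty values).keys := by
    rw [hkeys]
    exact (PySem.Set.mem_ofList values v).mpr hv
  have hg := get?_buildDict values PySem.Dict.empty (by simp) (by simp) v hvk
  rw [PySem.Dict.getD_eq_get?_getD, hg, hkeys]
  rfl

-- a fold of Set.add only appends: the start set is a prefix of the result
lemma foldl_add_prefix (l : List String) (s : PySem.Set String) :
    ∃ t, l.foldl PySem.Set.add s = s ++ t := by
  induction l generalizing s with
  | nil => exact ⟨[], by simp⟩
  | cons x rest ih =>
    rcases ih (PySem.Set.add s x) with ⟨t, ht⟩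
    by_cases hx : x ∈ s
    · refine ⟨t, ?_⟩
      rw [List.foldl_cons]
      rw [show PySem.Set.add s x = s by simp [PySem.Set.add, PySem.Set.contains, hx]] at ht ⊢
      exact ht
    · refine ⟨x :: t, ?_⟩
      rw [List.foldl_cons]
      rw [show PySem.Set.add s x = s ++ [x] by simp [PySem.Set.add, PySem.Set.contains, hx]] at ht ⊢
      simpa using ht

-- B's element for v ∈ values is the same first-occurrence rank
lemma encodeB_elem (values : List String) (v : String) (hv : v ∈ values) :
    (match PySem.List.index? values v with
      | some j => PySem.Set.len (PySem.Set.ofList (PySem.List.slice values none (some ((j : Int) + 1)))) - 1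
      | none => 0)
      = (((PySem.Set.ofList values).idxOf v : Nat) : Int) := by
  obtain ⟨j, hj⟩ := Option.isSome_iff_exists.mp ((PySem.List.index?_isSome_iff values v).mpr hv)
  obtain ⟨pre, suf, hsplit, hlen, hpre⟩ := (PySem.List.index?_eq_some_iff values v j).mp hj
  rw [hj]
  show PySem.Set.len (PySem.Set.ofList (PySem.List.slice values none (some ((j : Int) + 1)))) - 1
      = (((PySem.Set.ofList values).idxOf v : Nat) : Int)
  have hcast : ((j : Int) + 1) = ((j + 1 : Nat) : Int) := by push_cast; ring
  rw [hcast, PySem.List.slice_to_natCast]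
  have htake : values.take (j + 1) = pre ++ [v] := by
    rw [hsplit, ← hlen]
    rw [show pre ++ v :: suf = (pre ++ [v]) ++ suf by simp]
    rw [show pre.length + 1 = (pre ++ [v]).length by simp]
    exact List.take_left
  rw [htake]
  have hpre' : v ∉ PySem.Set.ofList pre := fun h => hpre ((PySem.Set.mem_ofList pre v).mp h)
  have hofl : PySem.Set.ofList (pre ++ [v]) = PySem.Set.ofList pre ++ [v] := by
    rw [PySem.Set.ofList_eq_foldl, List.foldl_append, ← PySem.Set.ofList_eq_foldl]
    simp [PySem.Set.add, PySem.Set.contains, hpre']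
  have hD : ∃ t, PySem.Set.ofList values = (PySem.Set.ofList pre ++ [v]) ++ t := by
    rw [hsplit, show pre ++ v :: suf = (pre ++ [v]) ++ suf by simp,
      PySem.Set.ofList_eq_foldl, List.foldl_append, ← PySem.Set.ofList_eq_foldl, hofl]
    exact foldl_add_prefix suf _
  rcases hD with ⟨t, ht⟩
  rw [ht, List.idxOf_append_of_mem (by simp), List.idxOf_append, if_neg hpre']
  simp [hofl, PySem.Set.len]

-- ===== VERDICT (by name: the statement is the Claim_ definition above) =====
theorem encode_categorical_values_spec : Claim_equal_encode_categorical_values := by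
  intro values _
  unfold Spec_encode_categorical_values encode_categorical_values_alt
  rw [encodeA_eq_map_idxOf]
  exact (List.map_congr_left (fun v hv => (encodeB_elem values v hv).symm))
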